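-- pv_equiv track=rewrite | github.com/oldweb-today/netcapsule | pywb/mementoquery.py | sort_archives
-- ===== SOURCE A (Python) =====
-- def sort_archives(archive_list):
--     ait = None
--     ia = None
--     pt = None
--     for url in archive_list:
--         if '/web.archive.org/' in url:
--             ia = url
--         elif '/wayback.archive-it.org/' in url:
--             ait = url
--         elif '/arquivo.pt/' in url:
--             pt = url
--         elif '/archive.today/' in url:
--             continue
--         else:
--             yield url
--
--     if ait:
--         yield ait
--
--     if ia:
--         yield ia
--
--     if pt:
--         yield pt
-- ===== SOURCE B (Python) =====
-- # Two-pass reimplementation: emit every uncategorized URL in input order,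
-- # then the most recent URL of each special category in a fixed order.
-- ARCHIVE_TAGS = ('/web.archive.org/', '/wayback.archive-it.org/',
--                 '/arquivo.pt/', '/archive.today/')
--
--
-- def category(url):
--     return next((tag for tag in ARCHIVE_TAGS if tag in url), None)
--
--
-- def sort_archives(archive_list):
--     urls = list(archive_list)
--     yield from (u for u in urls if category(u) is None)
--     for tag in ('/wayback.archive-it.org/', '/web.archive.org/', '/arquivo.pt/'):
--         latest = next((u for u in reversed(urls) if category(u) == tag), None)
--         if latest is not None:
--             yield latest
-- ===== Notes on version B (the rewrite author's own statement) =====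
-- stated objective: alternative
-- what changed: Replaces A's single stateful classifying pass (three mutable slots updated under if/elif priority) by a category classifier plus two passes: a filter pass yielding uncategorized URLs, then a last-occurrence scan per special category emitted in fixed order.
import Mathlib
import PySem

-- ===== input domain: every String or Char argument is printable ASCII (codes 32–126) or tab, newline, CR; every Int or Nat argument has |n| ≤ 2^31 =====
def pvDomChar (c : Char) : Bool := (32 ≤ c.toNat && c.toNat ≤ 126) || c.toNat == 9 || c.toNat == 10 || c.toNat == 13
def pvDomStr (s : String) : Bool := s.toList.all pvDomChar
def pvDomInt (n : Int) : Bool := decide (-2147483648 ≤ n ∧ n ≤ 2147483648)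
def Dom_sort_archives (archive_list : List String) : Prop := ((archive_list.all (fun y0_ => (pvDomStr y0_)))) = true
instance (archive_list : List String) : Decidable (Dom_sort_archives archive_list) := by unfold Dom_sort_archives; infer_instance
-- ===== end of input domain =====

-- B restructures A's single classifying pass into a filter pass plus per-category
-- last-occurrence scans driven by one category classifier; same O(n) cost.

-- ===== PORT A =====
-- Python truthiness of an Optional[str] slot: yield it iff it is a non-empty string.
def pvTruthy : Option String → List String
  | none => []
  | some s => if s = "" then [] else [s]

def sortA_go (l : List String) (ait ia pt : Option String) : List String :=
  match l with
  | [] => pvTruthy ait ++ pvTruthy ia ++ pvTruthy pt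
  | url :: rest =>
    if PySem.Str.isIn "/web.archive.org/" url then sortA_go rest ait (some url) pt
    else if PySem.Str.isIn "/wayback.archive-it.org/" url then sortA_go rest (some url) ia pt
    else if PySem.Str.isIn "/arquivo.pt/" url then sortA_go rest ait ia (some url)
    else if PySem.Str.isIn "/archive.today/" url then sortA_go rest ait ia pt
    else url :: sortA_go rest ait ia pt

def sort_archives (archive_list : List String) : List String :=
  sortA_go archive_list none none none

-- ===== PORT B =====
def pvArchiveTags : List String :=
  ["/web.archive.org/", "/wayback.archive-it.org/", "/arquivo.pt/", "/archive.today/"]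

def pvCategory (url : String) : Option String :=
  pvArchiveTags.find? (fun tag => PySem.Str.isIn tag url)

def sort_archives_alt (archive_list : List String) : List String :=
  archive_list.filter (fun u => (pvCategory u).isNone)
    ++ (["/wayback.archive-it.org/", "/web.archive.org/", "/arquivo.pt/"].flatMap
         (fun tag => (archive_list.reverse.find? (fun u => pvCategory u == some tag)).toList))

-- ===== PRECONDITION & SPEC =====
def Spec_sort_archives (archive_list : List String) (out : List String) : Prop := out = sort_archives_alt archive_list
instance (archive_list : List String) (out : List String) : Decidable (Spec_sort_archives archive_list out) := by unfold Spec_sort_archives; infer_instance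

-- ===== CLAIM (what is proved, stated in full; the proofs are below) =====
def Claim_equal_sort_archives : Prop := ∀ (archive_list : List String), Dom_sort_archives archive_list → Spec_sort_archives archive_list (sort_archives archive_list)

-- ===== LEMMAS AND PROOFS =====

-- later occurrences win: combine a scan result with an incoming slot value
def pvComb (o : Option String) (d : Option String) : Option String :=
  match o with
  | some u => some u
  | none => d

theorem pvComb_some (u : String) (d : Option String) : pvComb (some u) d = some u := rfl

theorem pvComb_getD (o : Option String) (u : String) : pvComb o (some u) = some (o.getD u) := by
  cases o <;> rfl

theorem pvComb_none_right (o : Option String) : pvComb o none = o := by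
  cases o <;> rfl

theorem pvCatIA (u : String) :
    (pvCategory u == some "/web.archive.org/") = PySem.Str.isIn "/web.archive.org/" u := by
  simp only [pvCategory, pvArchiveTags, List.find?, PySem.Str.isIn]
  repeat' split
  all_goals simp_all

theorem pvCatAIT (u : String) :
    (pvCategory u == some "/wayback.archive-it.org/")
      = (PySem.Str.isIn "/wayback.archive-it.org/" u && !PySem.Str.isIn "/web.archive.org/" u) := by
  simp only [pvCategory, pvArchiveTags, List.find?, PySem.Str.isIn]
  repeat' split
  all_goals simp_all

theorem pvCatPT (u : String) :
    (pvCategory u == some "/arquivo.pt/")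
      = (PySem.Str.isIn "/arquivo.pt/" u &&
         !(PySem.Str.isIn "/web.archive.org/" u || PySem.Str.isIn "/wayback.archive-it.org/" u)) := by
  simp only [pvCategory, pvArchiveTags, List.find?, PySem.Str.isIn]
  repeat' split
  all_goals simp_all

theorem pvCatNone (u : String) :
    (pvCategory u).isNone
      = !(PySem.Str.isIn "/web.archive.org/" u || PySem.Str.isIn "/wayback.archive-it.org/" u
          || PySem.Str.isIn "/arquivo.pt/" u || PySem.Str.isIn "/archive.today/" u) := by
  simp only [pvCategory, pvArchiveTags, List.find?, PySem.Str.isIn]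
  repeat' split
  all_goals simp_all

-- the central invariant: A's loop = B's filter pass ++ emitted final slots
theorem sortA_go_eq (l : List String) (ait ia pt : Option String) :
    sortA_go l ait ia pt
      = l.filter (fun u => (pvCategory u).isNone)
        ++ (pvTruthy (pvComb (l.reverse.find? (fun u => pvCategory u == some "/wayback.archive-it.org/")) ait)
            ++ pvTruthy (pvComb (l.reverse.find? (fun u => pvCategory u == some "/web.archive.org/")) ia)
            ++ pvTruthy (pvComb (l.reverse.find? (fun u => pvCategory u == some "/arquivo.pt/")) pt)) := by
  induction l generalizing ait ia pt with
  | nil => simp [sortA_go, pvComb]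
  | cons url rest ih =>
    simp only [sortA_go]
    split_ifs with h0 h1 h2 h3 <;>
      simp_all [pvCatIA, pvCatAIT, pvCatPT, pvCatNone, pvComb_some, pvComb_getD]

-- a URL containing a non-empty substring is itself non-empty
theorem ne_empty_of_isIn (sub u : String) (hs : sub ≠ "")
    (h : PySem.Str.isIn sub u = true) : u ≠ "" := by
  intro hu
  subst hu
  rw [PySem.Str.isIn_iff_infix] at h
  simp at h
  exact hs (by cases sub; simp_all)

-- the last-occurrence scans only ever find non-empty URLs, so Python
-- truthiness coincides with the is-not-None test of B
theorem truthy_find (l : List String) (tag : String) (ht : tag ≠ "") :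
    pvTruthy (l.reverse.find? (fun u => pvCategory u == some tag))
      = (l.reverse.find? (fun u => pvCategory u == some tag)).toList := by
  cases hf : l.reverse.find? (fun u => pvCategory u == some tag) with
  | none => rfl
  | some u =>
    have hp := List.find?_some hf
    simp only [beq_iff_eq] at hp
    have hin : PySem.Str.isIn tag u = true := by
      have := List.find?_some (p := fun t => PySem.Str.isIn t u) hp
      exact this
    have hne : u ≠ "" := ne_empty_of_isIn tag u ht hin
    simp [pvTruthy, hne]

-- ===== VERDICT (by name: the statement is the Claim_ definition above) =====
theorem sort_archives_spec : Claim_equal_sort_archives := by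
  intro l _
  show sort_archives l = sort_archives_alt l
  unfold sort_archives sort_archives_alt
  rw [sortA_go_eq l none none none, pvComb_none_right, pvComb_none_right, pvComb_none_right,
    truthy_find l _ (by decide), truthy_find l _ (by decide), truthy_find l _ (by decide)]
  simp [List.flatMap_cons]
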